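-- pv_equiv track=rewrite | github.com/Fabritzio-L/actividad7 | actividad7.py | mayor_menor_frecuencia
-- ===== SOURCE A (Python) =====
-- def mayor_menor_frecuencia(numeros):
--     mayor = numeros[0]
--     menor = numeros[0]
--     for i in numeros:
--         if i > mayor:
--             mayor =i
--         elif i < menor:
--             menor = i
--     vistos=[]
--     repetidos =0
--     for i in range(len(numeros)):
--         actual = numeros[i]
--         if actual not in vistos:
--             frecuencia=0
--             for j in range(len(numeros)):
--                 if numeros[j]==actual:
--                     frecuencia +=1
--             if frecuencia >1:
--                 repetidos+=1
--             vistos.append(actual)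
--     return f"El mayor es {mayor}, el menor es {menor} y {repetidos} numeros se repiten"
-- ===== SOURCE B (Python) =====
-- def mayor_menor_frecuencia(numeros):
--     mayor = max(numeros)
--     menor = min(numeros)
--     conteo = {}
--     for n in numeros:
--         conteo[n] = conteo.get(n, 0) + 1
--     repetidos = 0
--     for c in conteo.values():
--         if c > 1:
--             repetidos += 1
--     return f"El mayor es {mayor}, el menor es {menor} y {repetidos} numeros se repiten"
-- ===== Notes on version B (the rewrite author's own statement) =====
-- stated objective: faster
-- what changed: Replaces the running-comparison min/max scan with max()/min() and the O(n^2) nested frequency rescan with a single counting-dict pass whose values are then checked once.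
-- outside the precondition, e.g. on mayor_menor_frecuencia([]): A raises IndexError, B raises ValueError
import Mathlib
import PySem

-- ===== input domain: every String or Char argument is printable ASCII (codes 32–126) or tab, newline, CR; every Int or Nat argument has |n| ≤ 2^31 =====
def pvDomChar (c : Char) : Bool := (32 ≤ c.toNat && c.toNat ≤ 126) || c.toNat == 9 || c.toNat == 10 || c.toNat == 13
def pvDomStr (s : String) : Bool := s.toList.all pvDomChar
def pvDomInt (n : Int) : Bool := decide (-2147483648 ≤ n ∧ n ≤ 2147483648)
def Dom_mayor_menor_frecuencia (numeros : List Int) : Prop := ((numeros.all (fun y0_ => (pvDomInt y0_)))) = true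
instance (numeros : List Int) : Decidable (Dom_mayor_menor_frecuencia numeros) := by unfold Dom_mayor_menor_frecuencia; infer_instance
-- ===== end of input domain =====

-- B replaces A's O(n^2) nested frequency rescan with one counting-dict pass (and min/max built-ins); objective: faster.

-- ===== PORT A =====
def mayor_menor_frecuencia (numeros : List Int) : String :=
  match numeros with
  | [] => ""  -- numeros[0] raises IndexError here; excluded by Pre_
  | h :: _ =>
    let mm := numeros.foldl (fun (st : Int × Int) i =>
      if i > st.1 then (i, st.2) else if i < st.2 then (st.1, i) else st) (h, h)
    let vr := (PySem.List.pyRange 0 (numeros.length : Int) 1).foldl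
      (fun (st : List Int × Int) idx =>
        let actual := PySem.List.pyGetD numeros idx 0
        if st.1.contains actual then st
        else
          let frecuencia := (PySem.List.pyRange 0 (numeros.length : Int) 1).foldl
            (fun f j => if PySem.List.pyGetD numeros j 0 == actual then f + 1 else f) (0 : Int)
          (st.1 ++ [actual], if frecuencia > 1 then st.2 + 1 else st.2)) (([] : List Int), (0 : Int))
    "El mayor es " ++ PySem.Int.toStr mm.1 ++ ", el menor es " ++ PySem.Int.toStr mm.2 ++
      " y " ++ PySem.Int.toStr vr.2 ++ " numeros se repiten"

-- ===== PORT B =====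
def mayor_menor_frecuencia_alt (numeros : List Int) : String :=
  match numeros with
  | [] => ""  -- max() raises ValueError here; excluded by Pre_
  | _ :: _ =>
    let mayor := (PySem.List.max? numeros (fun x => x)).getD 0
    let menor := (PySem.List.min? numeros (fun x => x)).getD 0
    let conteo := numeros.foldl
      (fun (d : PySem.Dict Int Int) n => d.insert n (d.getD n 0 + 1)) PySem.Dict.empty
    let repetidos := conteo.values.foldl
      (fun (acc : Int) c => if c > 1 then acc + 1 else acc) (0 : Int)
    "El mayor es " ++ PySem.Int.toStr mayor ++ ", el menor es " ++ PySem.Int.toStr menor ++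
      " y " ++ PySem.Int.toStr repetidos ++ " numeros se repiten"

-- ===== PRECONDITION & SPEC =====
-- A raises IndexError on the empty list (and B's max() raises ValueError), so Pre_ excludes it.
def Pre_mayor_menor_frecuencia (numeros : List Int) : Prop := numeros ≠ []
instance (numeros : List Int) : Decidable (Pre_mayor_menor_frecuencia numeros) := by
  unfold Pre_mayor_menor_frecuencia; infer_instance
def pvWitness_mayor_menor_frecuencia : List Int := [1, 2, 2]

def Spec_mayor_menor_frecuencia (numeros : List Int) (out : String) : Prop :=
  out = mayor_menor_frecuencia_alt numeros
instance (numeros : List Int) (out : String) : Decidable (Spec_mayor_menor_frecuencia numeros out) := by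
  unfold Spec_mayor_menor_frecuencia; infer_instance

-- ===== CLAIM (what is proved, stated in full; the proofs are below) =====
def Claim_equal_mayor_menor_frecuencia : Prop := ∀ (numeros : List Int), Dom_mayor_menor_frecuencia numeros → Pre_mayor_menor_frecuencia numeros → Spec_mayor_menor_frecuencia numeros (mayor_menor_frecuencia numeros)

-- ===== LEMMAS AND PROOFS =====


theorem pv_minmax_fold (l : List Int) (a b : Int) (h : b ≤ a) :
    l.foldl (fun (st : Int × Int) i =>
      if i > st.1 then (i, st.2) else if i < st.2 then (st.1, i) else st) (a, b)
      = (l.foldl max a, l.foldl min b) := by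
  induction l generalizing a b with
  | nil => rfl
  | cons x t ih =>
    simp only [List.foldl_cons]
    split_ifs with h1 h2
    · rw [show max a x = x by omega, show min b x = b by omega, ih x b (by omega)]
    · rw [show max a x = a by omega, show min b x = x by omega, ih a x (by omega)]
    · rw [show max a x = a by omega, show min b x = b by omega, ih a b h]

def pvNews (s l : List Int) : List Int :=
  match l with
  | [] => []
  | x :: t => if s.contains x then pvNews s t else x :: pvNews (s ++ [x]) t

theorem pv_update_eq_news (l s : List Int) :
    PySem.Set.update s l = s ++ pvNews s l := by
  induction l generalizing s with
  | nil => simp [PySem.Set.update, pvNews]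
  | cons x t ih =>
    simp only [PySem.Set.update, List.foldl_cons, pvNews] at *
    by_cases hc : x ∈ s
    · simp [PySem.Set.add, hc, ih]
    · simp [PySem.Set.add, hc, ih]

theorem pv_news_nil_eq_ofList (l : List Int) :
    pvNews [] l = PySem.Set.ofList l := by
  have := pv_update_eq_news l []
  rw [PySem.Set.update_nil_left] at this
  simpa using this.symm

theorem pv_seen_loop (q : Int → Bool) (l : List Int) : ∀ (s : List Int) (r : Int),
    l.foldl (fun (st : List Int × Int) x =>
      if st.1.contains x then st
      else (st.1 ++ [x], if q x then st.2 + 1 else st.2)) (s, r)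
      = (s ++ pvNews s l, r + ((pvNews s l).countP q : Int)) := by
  induction l with
  | nil => intro s r; simp [pvNews]
  | cons x t ih =>
    intro s r
    by_cases hc : s.contains x = true
    · simp only [List.foldl_cons, pvNews, hc, if_true]
      rw [ih s r]
    · simp only [List.foldl_cons, pvNews, hc, Bool.false_eq_true, if_false]
      rw [ih (s ++ [x]) (if q x then r + 1 else r)]
      simp only [List.countP_cons, List.append_assoc, List.singleton_append, Prod.mk.injEq]
      refine ⟨trivial, ?_⟩
      by_cases hq : q x = true
      · simp [hq]
        ring
      · simp [hq]


theorem mayor_menor_equal (numeros : List Int)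
    (hpre : numeros ≠ []) :
    mayor_menor_frecuencia numeros = mayor_menor_frecuencia_alt numeros := by
  match numeros, hpre with
  | h :: t, _ =>
    unfold mayor_menor_frecuencia mayor_menor_frecuencia_alt
    simp only
    rw [pv_minmax_fold (h :: t) h h le_rfl]
    rw [PySem.List.max?_id_cons, PySem.List.min?_id_cons]
    simp only [List.foldl_cons, max_self, min_self, Option.getD_some]
    rw [PySem.List.foldl_pyRange_zero_pyGetD' (h :: t) 0
      (fun (st : List Int × Int) actual =>
        if st.1.contains actual then st
        else
          ((st.1 ++ [actual]),
            if (PySem.List.pyRange 0 ((h :: t).length : Int) 1).foldl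
              (fun f j => if PySem.List.pyGetD (h :: t) j 0 == actual then f + 1 else f) (0 : Int) > 1
            then st.2 + 1 else st.2)) (([] : List Int), (0 : Int))]
    rw [PySem.List.foldl_congr_mem (h :: t) _
      (fun (st : List Int × Int) x =>
        if st.1.contains x then st
        else (st.1 ++ [x], if decide (1 < ((List.count x (h :: t) : Int))) then st.2 + 1 else st.2))
      (([] : List Int), (0 : Int))
      (by
        intro st x _
        rw [PySem.List.foldl_pyRange_zero_pyGetD' (h :: t) 0
          (fun (f : Int) y => if y == x then f + 1 else f) 0]
        rw [PySem.List.foldl_beq_add_one]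
        simp)]
    rw [pv_seen_loop (fun x => decide (1 < ((List.count x (h :: t) : Int)))) (h :: t) [] 0]
    have hcnt := PySem.Dict.foldl_insert_getD_add_one_eq_counter (h :: t)
      (κ := Int)
    rw [List.foldl_cons] at hcnt
    rw [hcnt]
    have hval : (PySem.Dict.counter (h :: t)).values
        = (PySem.Set.ofList (h :: t)).map (fun k => ((List.count k (h :: t) : Int))) := by
      show ((PySem.Dict.counter (h :: t)).items).map (·.2) = _
      rw [PySem.Dict.items_counter]
      simp [Function.comp]
    rw [hval, PySem.List.foldl_ite_add_one]
    simp [pv_news_nil_eq_ofList, List.countP_map, Function.comp_def]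

-- ===== VERDICT (by name: the statement is the Claim_ definition above) =====
theorem mayor_menor_frecuencia_spec : Claim_equal_mayor_menor_frecuencia := by
  intro numeros _ hpre
  unfold Spec_mayor_menor_frecuencia
  exact mayor_menor_equal numeros hpre
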